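-- pv_equiv track=rewrite | github.com/Constakour/q5-automorphism-analysis | scripts/verify_witness.py | find_swapper
-- ===== SOURCE A (Python) =====
-- import itertools
--
-- N = 5
--
-- NUM_VERTICES = 1 << N
--
-- FULL_MASK_Q5 = 0xFFFFFFFF
--
-- def apply_perm_to_vertex(v: int, perm):
--     """
--     perm[i] means: new bit i gets old bit perm[i]
--     i.e. (P v)_i = v_{perm[i]} with LSB indexing.
--     """
--     out = 0
--     for i in range(N):
--         bit = (v >> perm[i]) & 1
--         out |= (bit << i)
--     return out
--
-- def apply_affine_to_mask(mask: int, perm, c: int) -> int: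
--     res = 0
--     mm = mask
--     while mm:
--         lsb = mm & -mm
--         v = (lsb.bit_length() - 1)
--         img = apply_perm_to_vertex(v, perm) ^ c
--         res |= (1 << img)
--         mm ^= lsb
--     return res & 0xFFFFFFFF
--
-- def find_swapper(mask: int):
--     """
--     Search all 3840 automorphisms g(v)=P(v) XOR c to see if g(H)=H^c.
--     Returns (perm, c) if found, else None.
--     """
--     comp = FULL_MASK_Q5 ^ mask
--     for perm in itertools.permutations(range(N)):
--         for c in range(NUM_VERTICES):
--             img = apply_affine_to_mask(mask, perm, c)
--             if img == comp:
--                 return list(perm), c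
--     return None
-- ===== SOURCE B (Python) =====
-- import itertools
--
--
-- def _image(v, perm):
--     # image of vertex v under the bit permutation: new bit i = old bit perm[i]
--     return sum(((v >> perm[i]) & 1) << i for i in range(5))
--
--
-- def find_swapper(mask: int):
--     comp = 0xFFFFFFFF ^ mask
--     comp_bits = {q for q in range(32) if (comp >> q) & 1}
--     verts = [v for v in range(32) if (mask >> v) & 1]
--     if not verts:
--         return None
--     v0 = verts[0]
--     for perm in itertools.permutations(range(5)):
--         imgs = {_image(v, perm) for v in verts}
--         # any valid constant must map v0's image into the complement,
--         # so only the 16 xors with complement bits can work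
--         for c in sorted({_image(v0, perm) ^ q for q in comp_bits}):
--             if {x ^ c for x in imgs} == comp_bits:
--                 return list(perm), c
--     return None
-- ===== Notes on version B (the rewrite author's own statement) =====
-- stated objective: faster
-- what changed: Per permutation, B applies the permutation to each masked vertex once to build the image set, derives the only possible constants (image of the first vertex XOR a complement bit index) instead of scanning every constant, and verifies each candidate by a set comparison, taking the smallest valid one via sorted candidates; A recomputes the whole affine image bitmask from scratch for every (permutation, constant) pair.
import Mathlib
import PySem

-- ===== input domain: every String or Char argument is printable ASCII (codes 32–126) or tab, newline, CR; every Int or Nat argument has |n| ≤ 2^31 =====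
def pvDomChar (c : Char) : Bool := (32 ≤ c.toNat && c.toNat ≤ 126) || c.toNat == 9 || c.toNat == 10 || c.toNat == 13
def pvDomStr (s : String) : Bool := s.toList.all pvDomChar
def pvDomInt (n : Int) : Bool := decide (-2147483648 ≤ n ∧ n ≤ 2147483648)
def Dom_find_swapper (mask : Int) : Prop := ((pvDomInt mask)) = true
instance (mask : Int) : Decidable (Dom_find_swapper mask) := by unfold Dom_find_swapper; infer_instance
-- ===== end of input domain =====

-- B derives each permutation's candidate constants from the complement's bits and verifies them
-- by set comparison, instead of recomputing the whole affine image for all 32 constants.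

-- ===== PORT A =====
-- (the four lemmas before `pv_affine_loop` are cited by its termination proof)
theorem pvNat_and_pred (k q : Nat) :
    (2^(k+1)*q + 2^k) &&& (2^(k+1)*q + 2^k - 1) = 2^(k+1)*q := by
  have h1 : (2:Nat)^k < 2^(k+1) := Nat.pow_lt_pow_right one_lt_two (Nat.lt_succ_self k)
  have h2 : (2:Nat)^k - 1 < 2^(k+1) := lt_of_le_of_lt (Nat.sub_le _ _) h1
  have h0 : (0:Nat) < 2^(k+1) := Nat.two_pow_pos _
  have hone : 1 ≤ (2:Nat)^k := Nat.one_le_two_pow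
  have hm1 : 2^(k+1)*q + 2^k - 1 = 2^(k+1)*q + (2^k - 1) := by omega
  apply Nat.eq_of_testBit_eq
  intro j
  rw [Nat.testBit_and, hm1, Nat.testBit_two_pow_mul_add q h1 j,
      Nat.testBit_two_pow_mul_add q h2 j,
      show 2^(k+1)*q = 2^(k+1)*q + 0 by omega,
      Nat.testBit_two_pow_mul_add q h0 j]
  by_cases hj : j < k + 1
  · simp only [hj, if_pos, Nat.testBit_two_pow, Nat.testBit_two_pow_sub_one, Nat.zero_testBit]
    rcases Nat.lt_trichotomy j k with h | h | h <;> simp [h] <;> omega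
  · simp [hj]

theorem pvNat_xor_pow (k q : Nat) :
    (2^(k+1)*q + 2^k) ^^^ 2^k = 2^(k+1)*q := by
  have h1 : (2:Nat)^k < 2^(k+1) := Nat.pow_lt_pow_right one_lt_two (Nat.lt_succ_self k)
  have h0 : (0:Nat) < 2^(k+1) := Nat.two_pow_pos _
  apply Nat.eq_of_testBit_eq
  intro j
  rw [Nat.testBit_xor, Nat.testBit_two_pow_mul_add q h1 j,
      show 2^(k+1)*q = 2^(k+1)*q + 0 by omega,
      Nat.testBit_two_pow_mul_add q h0 j]
  by_cases hj : j < k + 1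
  · simp only [hj, if_pos, Nat.testBit_two_pow, Nat.zero_testBit]
    cases (2^(k+1)*q + 0).testBit j <;> rcases Nat.lt_trichotomy j k with h | h | h <;>
      simp [h]
  · simp [hj, show k ≠ j by omega]

theorem pvInt_lsb (m : Nat) (h : 0 < m) :
    ∃ k q : Nat, m = 2^(k+1)*q + 2^k ∧
      PySem.Int.band (m : Int) (-(m : Int)) = ((2^k : Nat) : Int) ∧
      PySem.Int.bxor (m : Int) ((2^k : Nat) : Int) = ((2^(k+1)*q : Nat) : Int) := by
  obtain ⟨k, r, hodd, hm⟩ := Nat.exists_eq_two_pow_mul_odd h.ne'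
  obtain ⟨q, hq⟩ := hodd
  have hmk : m = 2^(k+1)*q + 2^k := by
    subst hq hm; ring
  refine ⟨k, q, hmk, ?_, ?_⟩
  · have hneg : ¬ (0:Int) ≤ -(m:Int) := by
      omega
    have hsub : (-(-(m:Int)) - 1).toNat = m - 1 := by omega
    simp only [PySem.Int.band, Int.natCast_nonneg, if_true, hneg, if_false, hsub,
      Int.toNat_natCast]
    rw [show m - 1 = 2^(k+1)*q + 2^k - 1 from by rw [hmk], hmk, pvNat_and_pred]
    have hgoal : 2^(k+1)*q + 2^k - (2^(k+1)*q) = 2^k := Nat.add_sub_cancel_left _ _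
    rw [hgoal]
  · rw [PySem.Int.bxor_natCast, hmk, pvNat_xor_pow]

theorem pvStep_lt (mm : Int) (h : 0 < mm) :
    (PySem.Int.bxor mm (PySem.Int.band mm (-mm))).toNat < mm.toNat := by
  obtain ⟨k, q, hmk, hband, hxor⟩ := pvInt_lsb mm.toNat (by omega)
  have hmm : (mm.toNat : Int) = mm := Int.toNat_of_nonneg h.le
  rw [← hmm, hband, hxor]
  have hone : 1 ≤ (2:Nat)^k := Nat.one_le_two_pow
  omega

def apply_perm_to_vertex (v : Int) (perm : List Int) : Int :=
  (PySem.List.pyRange 0 5 1).foldl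
    (fun out i =>
      PySem.Int.bor out
        ((PySem.Int.band (v >>> (PySem.List.pyGetD perm i 0).toNat) 1) <<< i.toNat)) 0

def pv_affine_loop (perm : List Int) (c : Int) (mm res : Int) : Int :=
  if h : 0 < mm then
    let lsb := PySem.Int.band mm (-mm)
    let v : Int := (PySem.Int.bitLength lsb : Int) - 1
    let img := PySem.Int.bxor (apply_perm_to_vertex v perm) c
    pv_affine_loop perm c (PySem.Int.bxor mm lsb) (PySem.Int.bor res ((1 : Int) <<< img.toNat))
  else res
termination_by mm.toNat
decreasing_by exact pvStep_lt mm h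

def apply_affine_to_mask (mask : Int) (perm : List Int) (c : Int) : Int :=
  PySem.Int.band (pv_affine_loop perm c mask 0) 0xFFFFFFFF

def pv_c_loop (mask comp : Int) (perm : List Int) : List Int → Option (List Int × Int)
  | [] => none
  | c :: rest =>
    if apply_affine_to_mask mask perm c = comp then some (perm, c)
    else pv_c_loop mask comp perm rest

def pv_perm_loop (mask comp : Int) : List (List Int) → Option (List Int × Int)
  | [] => none
  | p :: rest =>
    match pv_c_loop mask comp p (PySem.List.pyRange 0 32 1) with
    | some r => some r
    | none => pv_perm_loop mask comp rest

def find_swapper (mask : Int) : Option (List Int × Int) :=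
  let comp := PySem.Int.bxor 0xFFFFFFFF mask
  pv_perm_loop mask comp (PySem.List.permutations (PySem.List.pyRange 0 5 1) 5)

-- proof-side abbreviations

-- ===== PORT B =====
def pv_image (v : Int) (perm : List Int) : Int :=
  ((PySem.List.pyRange 0 5 1).map
    (fun i => (PySem.Int.band (v >>> (PySem.List.pyGetD perm i 0).toNat) 1) <<< i.toNat)).sum

def pv_cand_loop (imgs compBits : PySem.Set Int) : List Int → Option Int
  | [] => none
  | c :: rest =>
    if PySem.Set.equal (PySem.Set.ofList (imgs.map (fun x => PySem.Int.bxor x c))) compBits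
    then some c
    else pv_cand_loop imgs compBits rest

def pv_perm_loop_alt (verts : List Int) (v0 : Int) (compBits : PySem.Set Int) :
    List (List Int) → Option (List Int × Int)
  | [] => none
  | p :: rest =>
    let imgs := PySem.Set.ofList (verts.map (fun v => pv_image v p))
    match pv_cand_loop imgs compBits
        (PySem.List.sorted
          (PySem.Set.ofList (compBits.map (fun q => PySem.Int.bxor (pv_image v0 p) q)))
          (fun x => x) false) with
    | some c => some (p, c)
    | none => pv_perm_loop_alt verts v0 compBits rest

def find_swapper_alt (mask : Int) : Option (List Int × Int) :=
  let comp := PySem.Int.bxor 0xFFFFFFFF mask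
  let compBits := PySem.Set.ofList
    ((PySem.List.pyRange 0 32 1).filter (fun q => PySem.Int.band (comp >>> q.toNat) 1 != 0))
  let verts := (PySem.List.pyRange 0 32 1).filter (fun v => PySem.Int.band (mask >>> v.toNat) 1 != 0)
  if verts = [] then none
  else
    pv_perm_loop_alt verts (PySem.List.pyGetD verts 0 0) compBits
      (PySem.List.permutations (PySem.List.pyRange 0 5 1) 5)

-- ===== PRECONDITION & SPEC =====
-- Pre_ excludes negative masks: there A's `while mm:` loop never terminates (mm stays negative
-- forever), so A never returns on them.
def Pre_find_swapper (mask : Int) : Prop := 0 ≤ mask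
instance (mask : Int) : Decidable (Pre_find_swapper mask) := by unfold Pre_find_swapper; infer_instance
def pvWitness_find_swapper : Int := 51

def Spec_find_swapper (mask : Int) (out : Option (List Int × Int)) : Prop := out = find_swapper_alt mask
instance (mask : Int) (out : Option (List Int × Int)) : Decidable (Spec_find_swapper mask out) := by
  unfold Spec_find_swapper; infer_instance

-- ===== CLAIM =====
def Claim_equal_find_swapper : Prop :=
  ∀ (mask : Int), Dom_find_swapper mask → Pre_find_swapper mask →
    Spec_find_swapper mask (find_swapper mask)

-- ===== LEMMAS AND PROOFS =====
theorem pvBitLength_pow (k : Nat) : PySem.Int.bitLength ((2^k : Nat) : Int) = k + 1 := by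
  have hne : ((2^k : Nat) : Int) ≠ 0 := by
    have : 0 < (2:Nat)^k := Nat.two_pow_pos k
    exact_mod_cast this.ne'
  have h1 := PySem.Int.lt_two_pow_bitLength ((2^k : Nat) : Int)
  have h2 := PySem.Int.two_pow_bitLength_le ((2^k : Nat) : Int) hne
  rw [Int.natAbs_natCast] at h1 h2
  have hk1 : k < PySem.Int.bitLength ((2^k : Nat) : Int) :=
    (Nat.pow_lt_pow_iff_right one_lt_two).mp h1
  have hk2 : PySem.Int.bitLength ((2^k : Nat) : Int) - 1 ≤ k :=
    (Nat.pow_le_pow_iff_right one_lt_two).mp h2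
  omega

theorem pv_loop_spec (perm : List Int) (c : Int) :
    ∀ m r : Nat, ∃ n : Nat, pv_affine_loop perm c (m : Int) (r : Int) = (n : Int) ∧
      ∀ j : Nat, (n.testBit j ↔ (r.testBit j = true ∨ ∃ u : Nat, m.testBit u ∧
        (PySem.Int.bxor (apply_perm_to_vertex (u : Int) perm) c).toNat = j)) := by
  intro m
  induction m using Nat.strong_induction_on with
  | _ m IH =>
    intro r
    by_cases hm : 0 < m
    · obtain ⟨k, q, hmk, hband, hxor⟩ := pvInt_lsb m hm
      have hlt : 2^(k+1)*q < m := by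
        rw [hmk]; exact Nat.lt_add_of_pos_right (Nat.two_pow_pos k)
      rw [pv_affine_loop, dif_pos (show (0:Int) < (m : Int) by exact_mod_cast hm)]
      simp only [hband, pvBitLength_pow, hxor]
      have hv : ((k + 1 : Nat) : Int) - 1 = ((k : Nat) : Int) := by push_cast; ring
      rw [hv]
      set ik : Nat := (PySem.Int.bxor (apply_perm_to_vertex ((k : Nat) : Int) perm) c).toNat
        with hik
      have hres : PySem.Int.bor (r : Int) ((1 : Int) <<< ik) = ((r ||| 1 <<< ik : Nat) : Int) := by
        rw [show ((1:Int)) = ((1:Nat) : Int) from rfl, ← Int.natCast_shiftLeft,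
          PySem.Int.bor_natCast]
      rw [hres]
      obtain ⟨n, hn, hbit⟩ := IH (2^(k+1)*q) hlt (r ||| 1 <<< ik)
      refine ⟨n, hn, ?_⟩
      intro j
      rw [hbit j]
      have h1 : (2:Nat)^k < 2^(k+1) := Nat.pow_lt_pow_right one_lt_two (Nat.lt_succ_self k)
      have h0 : (0:Nat) < 2^(k+1) := Nat.two_pow_pos _
      have htb : ∀ u : Nat, m.testBit u = ((decide (u = k)) || (2^(k+1)*q).testBit u) := by
        intro u
        rw [hmk, Nat.testBit_two_pow_mul_add q h1 u,
          show 2^(k+1)*q = 2^(k+1)*q + 0 from rfl,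
          Nat.testBit_two_pow_mul_add q h0 u]
        by_cases hu : u < k + 1
        · simp only [hu, if_pos, Nat.testBit_two_pow, Nat.zero_testBit, Bool.or_false]
          by_cases he : u = k <;> simp [he] <;> omega

        · have hne : u ≠ k := by omega
          simp [hu, hne]
      constructor
      · rintro (hor | ⟨u, hu, hfu⟩)
        · rw [Nat.testBit_or, Nat.one_shiftLeft, Nat.testBit_two_pow] at hor
          rcases Bool.or_eq_true_iff.mp hor with h | h
          · exact Or.inl h
          · refine Or.inr ⟨k, ?_, ?_⟩
            · rw [htb k]; simp
            · rw [← hik]; exact (of_decide_eq_true h).symm ▸ rfl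
        · refine Or.inr ⟨u, ?_, hfu⟩
          rw [htb u]; simp [hu]
      · rintro (hor | ⟨u, hu, hfu⟩)
        · exact Or.inl (by rw [Nat.testBit_or, hor]; simp)
        · rw [htb u] at hu
          rcases Bool.or_eq_true_iff.mp hu with h | h
          · have huk : u = k := of_decide_eq_true h
            subst huk
            left
            rw [Nat.testBit_or, Nat.one_shiftLeft, Nat.testBit_two_pow]
            simp [← hfu, hik]
          · exact Or.inr ⟨u, h, hfu⟩
    · have hm0 : m = 0 := by omega
      subst hm0
      rw [pv_affine_loop, dif_neg (by norm_num)]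
      exact ⟨r, rfl, by simp⟩

theorem pvRange5 : PySem.List.pyRange 0 5 1 = [0, 1, 2, 3, 4] := by decide

theorem pvRange32 : PySem.List.pyRange 0 32 1 =
    [0, 1, 2, 3, 4, 5, 6, 7, 8, 9, 10, 11, 12, 13, 14, 15, 16, 17, 18, 19, 20, 21, 22,
     23, 24, 25, 26, 27, 28, 29, 30, 31] := by decide

theorem pvOr_add (a t i : Nat) (ha : a < 2^i) (ht : t ≤ 1) :
    (a ||| t <<< i = t * 2^i + a) ∧ t * 2^i + a < 2^(i+1) := by
  constructor
  · rw [Nat.shiftLeft_eq, Nat.or_comm, show t * 2^i = 2^i * t from Nat.mul_comm t _,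
      ← Nat.two_pow_add_eq_or_of_lt ha t]
  · have h2 : (2:Nat)^(i+1) = 2 * 2^i := by rw [pow_succ]; ring
    have h3 : t * 2^i ≤ 1 * 2^i := Nat.mul_le_mul_right _ ht
    omega

theorem pvOrChain (t0 t1 t2 t3 t4 : Nat) (h0 : t0 ≤ 1) (h1 : t1 ≤ 1) (h2 : t2 ≤ 1)
    (h3 : t3 ≤ 1) (h4 : t4 ≤ 1) :
    (((t0 <<< 0 ||| t1 <<< 1) ||| t2 <<< 2) ||| t3 <<< 3) ||| t4 <<< 4
      = t0 + 2*t1 + 4*t2 + 8*t3 + 16*t4 := by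
  rw [Nat.shiftLeft_zero]
  obtain ⟨e1, b1⟩ := pvOr_add t0 t1 1 (by norm_num; omega) h1
  rw [e1]
  obtain ⟨e2, b2⟩ := pvOr_add (t1 * 2^1 + t0) t2 2 (by norm_num at b1 ⊢; omega) h2
  rw [e2]
  obtain ⟨e3, b3⟩ := pvOr_add (t2 * 2^2 + (t1 * 2^1 + t0)) t3 3
    (by norm_num at b2 ⊢; omega) h3
  rw [e3]
  obtain ⟨e4, _⟩ := pvOr_add (t3 * 2^3 + (t2 * 2^2 + (t1 * 2^1 + t0))) t4 4
    (by norm_num at b3 ⊢; omega) h4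
  rw [e4]
  norm_num
  ring

theorem pv_apply_image (v : Int) (perm : List Int) (hv : 0 ≤ v) :
    ∃ t : Nat, t < 32 ∧ apply_perm_to_vertex v perm = (t : Int) ∧ pv_image v perm = (t : Int) := by
  have hband : ∀ s : Nat, PySem.Int.band (v >>> s) 1 = (((v.toNat >>> s) &&& 1 : Nat) : Int) := by
    intro s
    rw [show (v >>> s) = ((v.toNat >>> s : Nat) : Int) from by
        rw [Int.natCast_shiftRight, Int.toNat_of_nonneg hv],
      show (1:Int) = ((1:Nat):Int) from rfl, PySem.Int.band_natCast]
  have hble : ∀ s : Nat, (v.toNat >>> s) &&& 1 ≤ 1 := by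
    intro s; rw [Nat.and_one_is_mod]; omega
  set b0 : Nat := (v.toNat >>> (PySem.List.pyGetD perm 0 0).toNat) &&& 1 with hb0
  set b1 : Nat := (v.toNat >>> (PySem.List.pyGetD perm 1 0).toNat) &&& 1 with hb1
  set b2 : Nat := (v.toNat >>> (PySem.List.pyGetD perm 2 0).toNat) &&& 1 with hb2
  set b3 : Nat := (v.toNat >>> (PySem.List.pyGetD perm 3 0).toNat) &&& 1 with hb3
  set b4 : Nat := (v.toNat >>> (PySem.List.pyGetD perm 4 0).toNat) &&& 1 with hb4
  have hchain := pvOrChain b0 b1 b2 b3 b4 (hble _) (hble _) (hble _) (hble _) (hble _)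
  refine ⟨b0 + 2*b1 + 4*b2 + 8*b3 + 16*b4, ?_, ?_, ?_⟩
  · have := hble (PySem.List.pyGetD perm 0 0).toNat
    have := hble (PySem.List.pyGetD perm 1 0).toNat
    have := hble (PySem.List.pyGetD perm 2 0).toNat
    have := hble (PySem.List.pyGetD perm 3 0).toNat
    have := hble (PySem.List.pyGetD perm 4 0).toNat
    omega
  · rw [apply_perm_to_vertex, pvRange5]
    simp only [List.foldl_cons, List.foldl_nil]
    simp only [show ((0:Int)).toNat = 0 from rfl, show ((1:Int)).toNat = 1 from rfl,
      show ((2:Int)).toNat = 2 from rfl, show ((3:Int)).toNat = 3 from rfl,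
      show ((4:Int)).toNat = 4 from rfl]
    simp only [hband, ← Int.natCast_shiftLeft]
    rw [PySem.Int.bor_comm 0, PySem.Int.bor_zero]
    simp only [PySem.Int.bor_natCast]
    exact_mod_cast hchain
  · rw [pv_image, pvRange5]
    simp only [List.map_cons, List.map_nil, List.sum_cons, List.sum_nil]
    simp only [show ((0:Int)).toNat = 0 from rfl, show ((1:Int)).toNat = 1 from rfl,
      show ((2:Int)).toNat = 2 from rfl, show ((3:Int)).toNat = 3 from rfl,
      show ((4:Int)).toNat = 4 from rfl]
    simp only [hband, ← Int.natCast_shiftLeft]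
    simp only [add_zero, ← Nat.cast_add]
    have : b0 <<< 0 + (b1 <<< 1 + (b2 <<< 2 + (b3 <<< 3 + b4 <<< 4)))
        = b0 + 2*b1 + 4*b2 + 8*b3 + 16*b4 := by
      simp only [Nat.shiftLeft_eq]
      norm_num
      ring
    exact_mod_cast this

def pvVerts (mask : Int) : List Int :=
  (PySem.List.pyRange 0 32 1).filter (fun v => PySem.Int.band (mask >>> v.toNat) 1 != 0)

def pvCompBits (mask : Int) : PySem.Set Int :=
  PySem.Set.ofList ((PySem.List.pyRange 0 32 1).filter
    (fun q => PySem.Int.band ((PySem.Int.bxor 0xFFFFFFFF mask) >>> q.toNat) 1 != 0))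

def pvF (perm : List Int) (c : Int) (u : Nat) : Nat :=
  (PySem.Int.bxor (apply_perm_to_vertex (u : Int) perm) c).toNat

theorem pvBit (M u : Nat) : (PySem.Int.band ((M : Int) >>> u) 1 != 0) = M.testBit u := by
  rw [← Int.natCast_shiftRight, show (1:Int) = ((1:Nat):Int) from rfl, PySem.Int.band_natCast,
    Nat.and_one_is_mod, Nat.shiftRight_eq_div_pow, Nat.testBit_eq_decide_div_mod_eq]
  rcases Nat.mod_two_eq_zero_or_one (M / 2^u) with h | h <;> rw [h] <;> simp

theorem pvComp_cast (M : Nat) :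
    PySem.Int.bxor 0xFFFFFFFF (M : Int) = ((4294967295 ^^^ M : Nat) : Int) := by
  rw [show (0xFFFFFFFF:Int) = ((4294967295:Nat):Int) from rfl, PySem.Int.bxor_natCast]

theorem pvMem_verts (M : Nat) (x : Int) :
    x ∈ pvVerts (M : Int) ↔ ∃ u : Nat, u < 32 ∧ M.testBit u ∧ x = (u : Int) := by
  unfold pvVerts
  rw [List.mem_filter, PySem.List.mem_pyRange_one]
  constructor
  · rintro ⟨⟨h0, h32⟩, hp⟩
    rw [pvBit M x.toNat] at hp
    exact ⟨x.toNat, by omega, hp, by omega⟩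
  · rintro ⟨u, hu, hb, rfl⟩
    refine ⟨⟨Int.natCast_nonneg u, by exact_mod_cast hu⟩, ?_⟩
    rw [show ((u:Int)).toNat = u from Int.toNat_natCast u, pvBit]
    exact hb

theorem pvMem_compBits (M : Nat) (x : Int) :
    x ∈ pvCompBits (M : Int) ↔
      ∃ j : Nat, j < 32 ∧ (4294967295 ^^^ M).testBit j ∧ x = (j : Int) := by
  unfold pvCompBits
  rw [PySem.Set.mem_ofList, List.mem_filter, PySem.List.mem_pyRange_one, pvComp_cast]
  constructor
  · rintro ⟨⟨h0, h32⟩, hp⟩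
    rw [pvBit _ x.toNat] at hp
    exact ⟨x.toNat, by omega, hp, by omega⟩
  · rintro ⟨j, hj, hb, rfl⟩
    refine ⟨⟨Int.natCast_nonneg j, by exact_mod_cast hj⟩, ?_⟩
    rw [show ((j:Int)).toNat = j from Int.toNat_natCast j, pvBit]
    exact hb

theorem pvBit_lt (M u : Nat) (hM : M < 2^32) (h : M.testBit u = true) : u < 32 := by
  have h1 := Nat.ge_two_pow_of_testBit h
  by_contra hu
  have : (2:Nat)^32 ≤ 2^u := Nat.pow_le_pow_right (by norm_num) (by omega)
  omega

theorem pvF_fact (perm : List Int) (c : Int) (hc0 : 0 ≤ c) (hc32 : c < 32) (u : Nat) :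
    pvF perm c u < 32 ∧
      PySem.Int.bxor (apply_perm_to_vertex (u : Int) perm) c = ((pvF perm c u : Nat) : Int) := by
  obtain ⟨t, ht, ha, _⟩ := pv_apply_image (u : Int) perm (Int.natCast_nonneg u)
  have hcN : c = ((c.toNat : Nat) : Int) := (Int.toNat_of_nonneg hc0).symm
  have hcN32 : c.toNat < 32 := by omega
  have hval : PySem.Int.bxor (apply_perm_to_vertex (u : Int) perm) c
      = ((t ^^^ c.toNat : Nat) : Int) := by
    rw [ha, hcN, PySem.Int.bxor_natCast, Int.toNat_natCast]
  have hFv : pvF perm c u = t ^^^ c.toNat := by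
    rw [pvF, hval, Int.toNat_natCast]
  refine ⟨?_, by rw [hval, hFv]⟩
  rw [hFv]
  exact Nat.xor_lt_two_pow (n := 5) ht hcN32

theorem pvImage_eq (v : Int) (perm : List Int) (hv : 0 ≤ v) :
    pv_image v perm = apply_perm_to_vertex v perm := by
  obtain ⟨t, _, ha, hb⟩ := pv_apply_image v perm hv
  rw [ha, hb]

theorem pvAcond (M : Nat) (hM : M < 2^32) (perm : List Int) (c : Int) :
    (apply_affine_to_mask (M : Int) perm c = PySem.Int.bxor 0xFFFFFFFF (M : Int)) ↔
      (∀ j : Nat, j < 32 →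
        ((∃ u : Nat, M.testBit u ∧ pvF perm c u = j) ↔ (4294967295 ^^^ M).testBit j)) := by
  obtain ⟨n, hn, hbit⟩ := pv_loop_spec perm c M 0
  rw [pvComp_cast, apply_affine_to_mask, show (0:Int) = ((0:Nat):Int) from rfl, hn,
    show (0xFFFFFFFF:Int) = ((4294967295:Nat):Int) from rfl, PySem.Int.band_natCast,
    Int.natCast_inj]
  have hC : (4294967295 ^^^ M) < 2^32 :=
    Nat.xor_lt_two_pow (by norm_num) hM
  have hFB : ∀ j : Nat, Nat.testBit 4294967295 j = decide (j < 32) := by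
    intro j
    rw [show (4294967295:Nat) = 2^32 - 1 by norm_num]
    exact Nat.testBit_two_pow_sub_one _ _
  have hbit' : ∀ j : Nat, n.testBit j = true ↔ ∃ u : Nat, M.testBit u ∧ pvF perm c u = j := by
    intro j
    rw [hbit j]
    simp [pvF]
  constructor
  · intro heq j hj
    have h2 : n.testBit j = (4294967295 ^^^ M).testBit j := by
      have h3 := congrArg (fun z => z.testBit j) heq
      simp only [Nat.testBit_and, hFB j, hj, decide_true, Bool.and_true] at h3
      exact h3
    rw [← hbit' j, h2]
  · intro h
    apply Nat.eq_of_testBit_eq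
    intro j
    rw [Nat.testBit_and, hFB j]
    by_cases hj : j < 32
    · simp only [hj, decide_true, Bool.and_true]
      have h4 := h j hj
      rw [← hbit' j] at h4
      exact Bool.eq_iff_iff.mpr h4
    · simp only [hj, decide_false, Bool.and_false]
      symm
      exact Nat.testBit_eq_false_of_lt
        (lt_of_lt_of_le hC (Nat.pow_le_pow_right (by norm_num) (by omega)))

theorem pvBcond (M : Nat) (hM : M < 2^32) (p : List Int) (c : Int) (hc0 : 0 ≤ c) (hc32 : c < 32) :
    (PySem.Set.equal (PySem.Set.ofList ((PySem.Set.ofList ((pvVerts (M:Int)).map (fun v => pv_image v p))).map (fun x => PySem.Int.bxor x c))) (pvCompBits (M:Int)) = true) ↔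
      (∀ j : Nat, j < 32 → ((∃ u : Nat, M.testBit u ∧ pvF p c u = j) ↔ (4294967295 ^^^ M).testBit j)) := by
  rw [PySem.Set.equal_iff]
  have hmemL : ∀ x : Int, (x ∈ PySem.Set.ofList ((PySem.Set.ofList ((pvVerts (M:Int)).map (fun v => pv_image v p))).map (fun y => PySem.Int.bxor y c))) ↔ ∃ u : Nat, u < 32 ∧ M.testBit u ∧ x = ((pvF p c u : Nat) : Int) := by
    intro x
    rw [PySem.Set.mem_ofList, List.mem_map]
    constructor
    · rintro ⟨y, hy, rfl⟩
      rw [PySem.Set.mem_ofList, List.mem_map] at hy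
      obtain ⟨v, hv, rfl⟩ := hy
      rw [pvMem_verts] at hv
      obtain ⟨u, hu, hb, rfl⟩ := hv
      refine ⟨u, hu, hb, ?_⟩
      rw [pvImage_eq _ _ (Int.natCast_nonneg u), (pvF_fact p c hc0 hc32 u).2]
    · rintro ⟨u, hu, hb, rfl⟩
      refine ⟨pv_image ((u:Nat):Int) p, ?_, ?_⟩
      · rw [PySem.Set.mem_ofList, List.mem_map]
        exact ⟨((u:Nat):Int), (pvMem_verts M _).mpr ⟨u, hu, hb, rfl⟩, rfl⟩
      · rw [pvImage_eq _ _ (Int.natCast_nonneg u), (pvF_fact p c hc0 hc32 u).2]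
  constructor
  · intro h j hj
    constructor
    · rintro ⟨u, hb, hf⟩
      have hu32 : u < 32 := pvBit_lt M u hM hb
      have hx := (h ((j:Nat):Int)).mp ((hmemL _).mpr ⟨u, hu32, hb, by rw [hf]⟩)
      rw [pvMem_compBits] at hx
      obtain ⟨j', hj', hbj, hjj⟩ := hx
      have hjeq : j = j' := by exact_mod_cast hjj
      rwa [hjeq]
    · intro hbj
      have hx := (h ((j:Nat):Int)).mpr ((pvMem_compBits M _).mpr ⟨j, hj, hbj, rfl⟩)
      rw [hmemL] at hx
      obtain ⟨u, hu, hb, hxe⟩ := hx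
      exact ⟨u, hb, by exact_mod_cast hxe.symm⟩
  · intro h x
    rw [hmemL, pvMem_compBits]
    constructor
    · rintro ⟨u, hu, hb, rfl⟩
      have hflt := (pvF_fact p c hc0 hc32 u).1
      exact ⟨pvF p c u, hflt, (h _ hflt).mp ⟨u, hb, rfl⟩, rfl⟩
    · rintro ⟨j, hj, hbj, rfl⟩
      obtain ⟨u, hb, hf⟩ := (h j hj).mpr hbj
      exact ⟨u, pvBit_lt M u hM hb, hb, by rw [hf]⟩

theorem pvMem_cands (M : Nat) (p : List Int) (v0 : Int) (x : Int) :
    x ∈ PySem.List.sorted (PySem.Set.ofList ((pvCompBits (M:Int)).map (fun q => PySem.Int.bxor (pv_image v0 p) q))) (fun y => y) false ↔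
      ∃ j : Nat, j < 32 ∧ (4294967295 ^^^ M).testBit j ∧ x = PySem.Int.bxor (pv_image v0 p) ((j:Nat):Int) := by
  rw [PySem.List.mem_sorted, PySem.Set.mem_ofList, List.mem_map]
  constructor
  · rintro ⟨q, hq, rfl⟩
    rw [pvMem_compBits] at hq
    obtain ⟨j, hj, hb, rfl⟩ := hq
    exact ⟨j, hj, hb, rfl⟩
  · rintro ⟨j, hj, hb, rfl⟩
    exact ⟨((j:Nat):Int), (pvMem_compBits M _).mpr ⟨j, hj, hb, rfl⟩, rfl⟩

theorem pvVerts_nil (M : Nat) (hM : M < 2^32) : (pvVerts (M:Int) = []) ↔ M = 0 := by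
  constructor
  · intro h
    by_contra hz
    obtain ⟨u, hu⟩ := Nat.exists_testBit_of_ne_zero hz
    have hu32 : u < 32 := pvBit_lt M u hM hu
    have hmem : ((u:Nat):Int) ∈ pvVerts (M:Int) := (pvMem_verts M _).mpr ⟨u, hu32, hu, rfl⟩
    rw [h] at hmem
    cases hmem
  · intro h; subst h
    rw [pvVerts, List.filter_eq_nil_iff]
    intro x hx
    rw [pvBit 0 x.toNat]
    simp

theorem pvV0 (M : Nat) (hM : M < 2^32) (hz : M ≠ 0) :
    ∃ u0 : Nat, u0 < 32 ∧ M.testBit u0 ∧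
      PySem.List.pyGetD (pvVerts (M:Int)) 0 0 = ((u0:Nat):Int) := by
  have hne : pvVerts (M:Int) ≠ [] := fun h => hz ((pvVerts_nil M hM).mp h)
  cases hv : pvVerts (M:Int) with
  | nil => exact absurd hv hne
  | cons y t =>
    have hy : y ∈ pvVerts (M:Int) := by rw [hv]; exact List.mem_cons_self
    rw [pvMem_verts] at hy
    obtain ⟨u0, hu, hb, rfl⟩ := hy
    refine ⟨u0, hu, hb, ?_⟩
    rw [PySem.List.pyGetD_of_nonneg _ _ (le_refl (0:Int))]
    rfl

theorem pvFind_min (p : Int → Bool) : ∀ (L : List Int), L.Pairwise (· < ·) → ∀ x : Int,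
    x ∈ L → p x = true → (∀ y ∈ L, p y = true → x ≤ y) → L.find? p = some x := by
  intro L
  induction L with
  | nil => intro _ x hmem; cases hmem
  | cons a t IH =>
    intro hL x hmem hpx hmin
    by_cases hpa : p a = true
    · rw [List.find?_cons_of_pos hpa]
      rcases List.mem_cons.mp hmem with rfl | hxt
      · rfl
      · have hax : a < x := (List.pairwise_cons.mp hL).1 x hxt
        have hxa : x ≤ a := hmin a List.mem_cons_self hpa
        omega
    · rw [List.find?_cons_of_neg hpa]
      have hxt : x ∈ t := by
        rcases List.mem_cons.mp hmem with rfl | h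
        · exact absurd hpx hpa
        · exact h
      exact IH (List.pairwise_cons.mp hL).2 x hxt hpx
        (fun y hy hp => hmin y (List.mem_cons_of_mem a hy) hp)

theorem pvFind_min_out (p : Int → Bool) : ∀ (L : List Int), L.Pairwise (· < ·) → ∀ x : Int,
    L.find? p = some x → ∀ y ∈ L, p y = true → x ≤ y := by
  intro L
  induction L with
  | nil => intro _ x hf; simp [List.find?] at hf
  | cons a t IH =>
    intro hL x hf y hy hpy
    by_cases hpa : p a = true
    · rw [List.find?_cons_of_pos hpa] at hf
      cases hf
      rcases List.mem_cons.mp hy with rfl | hyt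
      · exact le_rfl
      · exact le_of_lt ((List.pairwise_cons.mp hL).1 y hyt)
    · rw [List.find?_cons_of_neg hpa] at hf
      rcases List.mem_cons.mp hy with rfl | hyt
      · exact absurd hpy hpa
      · exact IH (List.pairwise_cons.mp hL).2 x hf y hyt hpy

theorem pvFind_eq (p1 p2 : Int → Bool) (L1 L2 : List Int)
    (h1 : L1.Pairwise (· < ·)) (h2 : L2.Pairwise (· < ·))
    (hiff : ∀ x : Int, (x ∈ L1 ∧ p1 x = true) ↔ (x ∈ L2 ∧ p2 x = true)) :
    L1.find? p1 = L2.find? p2 := by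
  cases hf : List.find? p1 L1 with
  | none =>
    symm
    rw [List.find?_eq_none] at hf ⊢
    intro x hx hp
    obtain ⟨hx1, hp1⟩ := (hiff x).mpr ⟨hx, hp⟩
    exact hf x hx1 hp1
  | some x =>
    have hmem := List.mem_of_find?_eq_some hf
    have hpx := List.find?_some hf
    obtain ⟨hx2, hp2⟩ := (hiff x).mp ⟨hmem, hpx⟩
    have hmin1 := pvFind_min_out p1 L1 h1 x hf
    symm
    apply pvFind_min p2 L2 h2 x hx2 hp2
    intro y hy hpy
    obtain ⟨hy1, hpy1⟩ := (hiff y).mpr ⟨hy, hpy⟩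
    exact hmin1 y hy1 hpy1

theorem pv_c_loop_eq (mask comp : Int) (perm : List Int) : ∀ cs : List Int,
    pv_c_loop mask comp perm cs
      = (cs.find? (fun c => decide (apply_affine_to_mask mask perm c = comp))).map
          (fun c => (perm, c)) := by
  intro cs
  induction cs with
  | nil => rfl
  | cons c rest IH =>
    rw [pv_c_loop]
    by_cases h : apply_affine_to_mask mask perm c = comp
    · rw [if_pos h, List.find?_cons_of_pos (by simpa using h)]
      rfl
    · rw [if_neg h, List.find?_cons_of_neg (by simpa using h), IH]

theorem pv_cand_loop_eq (imgs compBits : PySem.Set Int) : ∀ cs : List Int,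
    pv_cand_loop imgs compBits cs
      = cs.find? (fun c =>
          PySem.Set.equal (PySem.Set.ofList (imgs.map (fun x => PySem.Int.bxor x c))) compBits) := by
  intro cs
  induction cs with
  | nil => rfl
  | cons c rest IH =>
    rw [pv_cand_loop]
    by_cases h : PySem.Set.equal
        (PySem.Set.ofList (imgs.map (fun x => PySem.Int.bxor x c))) compBits = true
    · rw [if_pos h]
      exact (List.find?_cons_of_pos (p := fun c => PySem.Set.equal
        (PySem.Set.ofList (imgs.map (fun x => PySem.Int.bxor x c))) compBits)
        (l := rest) h).symm
    · rw [if_neg h, List.find?_cons_of_neg (by simpa using h), IH]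

theorem pv_inner_eq (M : Nat) (hM : M < 2^32) (hz : M ≠ 0) (p : List Int) :
    pv_c_loop (M:Int) (PySem.Int.bxor 0xFFFFFFFF (M:Int)) p (PySem.List.pyRange 0 32 1)
      = (pv_cand_loop (PySem.Set.ofList ((pvVerts (M:Int)).map (fun v => pv_image v p)))
          (pvCompBits (M:Int))
          (PySem.List.sorted
            (PySem.Set.ofList ((pvCompBits (M:Int)).map
              (fun q => PySem.Int.bxor (pv_image (PySem.List.pyGetD (pvVerts (M:Int)) 0 0) p) q)))
            (fun x => x) false)).map (fun c => (p, c)) := by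
  obtain ⟨u0, hu0, hb0, hv0⟩ := pvV0 M hM hz
  rw [pv_c_loop_eq, pv_cand_loop_eq]
  refine congrArg (Option.map _) ?_
  apply pvFind_eq
  · rw [pvRange32]; decide
  · exact PySem.List.sorted_ofList_pairwise_lt _
  · intro x
    constructor
    · rintro ⟨hxr, hpx⟩
      rw [PySem.List.mem_pyRange_one] at hxr
      have hc0 : 0 ≤ x := hxr.1
      have hc32 : x < 32 := hxr.2
      have hstar := (pvAcond M hM p x).mp (of_decide_eq_true hpx)
      refine ⟨?_, ?_⟩
      · rw [pvMem_cands]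
        have hflt := (pvF_fact p x hc0 hc32 u0).1
        have hbj := (hstar (pvF p x u0) hflt).mp ⟨u0, hb0, rfl⟩
        refine ⟨pvF p x u0, hflt, hbj, ?_⟩
        rw [hv0, pvImage_eq _ _ (Int.natCast_nonneg u0)]
        obtain ⟨t, ht, ha, _⟩ := pv_apply_image ((u0:Nat):Int) p (Int.natCast_nonneg u0)
        have hFv : pvF p x u0 = t ^^^ x.toNat := by
          have hval : PySem.Int.bxor (apply_perm_to_vertex ((u0:Nat):Int) p) x
              = ((t ^^^ x.toNat : Nat) : Int) := by
            conv_lhs => rw [ha, show x = ((x.toNat:Nat):Int) from (Int.toNat_of_nonneg hc0).symm]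
            rw [PySem.Int.bxor_natCast]
          rw [pvF, hval, Int.toNat_natCast]
        rw [ha, hFv, PySem.Int.bxor_natCast,
          show t ^^^ (t ^^^ x.toNat) = x.toNat from by
            rw [← Nat.xor_assoc, Nat.xor_self, Nat.zero_xor],
          Int.toNat_of_nonneg hc0]
      · exact (pvBcond M hM p x hc0 hc32).mpr hstar
    · rintro ⟨hxc, hpx⟩
      rw [pvMem_cands] at hxc
      obtain ⟨j, hj, hbj, hxe⟩ := hxc
      obtain ⟨t, ht, ha, hbimg⟩ := pv_apply_image ((u0:Nat):Int) p (Int.natCast_nonneg u0)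
      have him : pv_image (PySem.List.pyGetD (pvVerts (M:Int)) 0 0) p = ((t:Nat):Int) := by
        rw [hv0, hbimg]
      have hxval : x = ((t ^^^ j : Nat) : Int) := by
        rw [hxe, him, PySem.Int.bxor_natCast]
      have hxlt : t ^^^ j < 32 := Nat.xor_lt_two_pow (n := 5) ht hj
      have hc0 : 0 ≤ x := by rw [hxval]; exact Int.natCast_nonneg _
      have hc32 : x < 32 := by rw [hxval]; exact_mod_cast hxlt
      refine ⟨by rw [PySem.List.mem_pyRange_one]; exact ⟨hc0, hc32⟩, ?_⟩
      have hstar := (pvBcond M hM p x hc0 hc32).mp hpx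
      exact decide_eq_true ((pvAcond M hM p x).mpr hstar)

theorem pv_outer (M : Nat) (hM : M < 2^32) (hz : M ≠ 0) : ∀ ps : List (List Int),
    pv_perm_loop (M:Int) (PySem.Int.bxor 0xFFFFFFFF (M:Int)) ps
      = pv_perm_loop_alt (pvVerts (M:Int)) (PySem.List.pyGetD (pvVerts (M:Int)) 0 0)
          (pvCompBits (M:Int)) ps := by
  intro ps
  induction ps with
  | nil => rfl
  | cons p rest IH =>
    rw [pv_perm_loop, pv_perm_loop_alt]
    rw [pv_inner_eq M hM hz p]
    cases h : pv_cand_loop (PySem.Set.ofList ((pvVerts (M:Int)).map (fun v => pv_image v p)))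
        (pvCompBits (M:Int))
        (PySem.List.sorted
          (PySem.Set.ofList ((pvCompBits (M:Int)).map
            (fun q => PySem.Int.bxor (pv_image (PySem.List.pyGetD (pvVerts (M:Int)) 0 0) p) q)))
          (fun x => x) false) with
    | none => simpa [h] using IH
    | some cc => simp

theorem pvA_none : ∀ ps : List (List Int),
    pv_perm_loop (0:Int) (PySem.Int.bxor 0xFFFFFFFF (0:Int)) ps = none := by
  have hc : ∀ p : List Int, ∀ cs : List Int,
      pv_c_loop (0:Int) (PySem.Int.bxor 0xFFFFFFFF (0:Int)) p cs = none := by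
    intro p cs
    induction cs with
    | nil => rfl
    | cons c rest IH =>
      rw [pv_c_loop, if_neg, IH]
      rw [apply_affine_to_mask]
      rw [pv_affine_loop, dif_neg (by norm_num)]
      decide
  intro ps
  induction ps with
  | nil => rfl
  | cons p rest IH =>
    rw [pv_perm_loop, hc p, IH]

theorem pv_main :
    ∀ (mask : Int), Dom_find_swapper mask → 0 ≤ mask →
      find_swapper mask = find_swapper_alt mask := by
  intro mask hdom hpre
  have hMlt : mask.toNat < 2^32 := by
    unfold Dom_find_swapper pvDomInt at hdom
    simp only [decide_eq_true_eq] at hdom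
    omega
  have hmask : mask = ((mask.toNat : Nat) : Int) := (Int.toNat_of_nonneg hpre).symm
  by_cases hz : mask.toNat = 0
  · have h0 : mask = 0 := by omega
    subst h0
    rw [show find_swapper 0
        = pv_perm_loop (0:Int) (PySem.Int.bxor 0xFFFFFFFF (0:Int))
            (PySem.List.permutations (PySem.List.pyRange 0 5 1) 5) from rfl,
      pvA_none]
    rfl
  · rw [hmask]
    set M := mask.toNat with hMdef
    rw [show find_swapper ((M:Nat):Int)
        = pv_perm_loop ((M:Nat):Int) (PySem.Int.bxor 0xFFFFFFFF ((M:Nat):Int))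
            (PySem.List.permutations (PySem.List.pyRange 0 5 1) 5) from rfl]
    rw [show find_swapper_alt ((M:Nat):Int)
        = (if pvVerts ((M:Nat):Int) = [] then none
           else pv_perm_loop_alt (pvVerts ((M:Nat):Int))
             (PySem.List.pyGetD (pvVerts ((M:Nat):Int)) 0 0) (pvCompBits ((M:Nat):Int))
             (PySem.List.permutations (PySem.List.pyRange 0 5 1) 5)) from rfl]
    rw [if_neg (fun h => hz ((pvVerts_nil M hMlt).mp h))]
    exact pv_outer M hMlt hz _

-- ===== VERDICT =====
theorem find_swapper_spec : Claim_equal_find_swapper := by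
  intro mask hdom hpre
  exact pv_main mask hdom hpre
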